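-- pv_equiv track=rewrite | github.com/pypi-data/pypi-mirror-126 | packages/aislab/aislab-0.0.9.tar.gz/aislab-0.0.9/aislab/op_nlopt/ga.py | fobj_sim
-- ===== SOURCE A (Python) =====
-- def fobj_sim(max_F, itrConstF):
--     result = False
--     br = 0
--     for i in range(len(max_F) - 1):
--         if max_F[i] == max_F[i + 1]:
--             br += 1
--         else:
--             br = 0
--     if br == itrConstF - 1: result = True
--     return result
-- ===== SOURCE B (Python) =====
-- def fobj_sim(max_F, itrConstF):
--     # length of the trailing run of equal elements, minus one:
--     # scan the reversed list and count leading equal adjacent pairs until a mismatch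
--     r = max_F[::-1]
--     br = 0
--     for a, b in zip(r, r[1:]):
--         if a != b:
--             break
--         br += 1
--     return br == itrConstF - 1
-- ===== Notes on version B (the rewrite author's own statement) =====
-- stated objective: simpler
-- what changed: Instead of scanning the whole list forward with an accumulate-and-reset counter, B reverses the list and counts leading equal adjacent pairs, stopping at the first mismatch (the final run is all that matters).
import Mathlib
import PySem

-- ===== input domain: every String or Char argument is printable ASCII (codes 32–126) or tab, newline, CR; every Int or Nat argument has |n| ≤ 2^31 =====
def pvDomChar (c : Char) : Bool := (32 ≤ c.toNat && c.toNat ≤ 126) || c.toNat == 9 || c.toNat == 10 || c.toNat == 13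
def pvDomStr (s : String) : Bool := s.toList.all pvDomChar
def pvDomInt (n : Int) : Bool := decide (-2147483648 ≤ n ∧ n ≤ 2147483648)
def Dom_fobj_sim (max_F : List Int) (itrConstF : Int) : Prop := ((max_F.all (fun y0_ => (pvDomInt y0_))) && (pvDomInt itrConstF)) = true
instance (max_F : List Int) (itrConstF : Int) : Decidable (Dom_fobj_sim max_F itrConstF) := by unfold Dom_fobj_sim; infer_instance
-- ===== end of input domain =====

-- B replaces A's forward accumulate-and-reset scan by reversing the list and counting
-- leading equal adjacent pairs up to the first mismatch (objective: simpler).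


-- ===== PORT A =====
-- for i in range(len(max_F)-1): br += 1 on equal neighbours, reset to 0 otherwise
def fobj_sim (max_F : List Int) (itrConstF : Int) : Bool :=
  let br : Int := (List.range (max_F.length - 1)).foldl
    (fun br i => if max_F.getD i 0 = max_F.getD (i + 1) 0 then br + 1 else 0) 0
  if br = itrConstF - 1 then true else false

-- ===== PORT B =====
-- count the leading equal adjacent pairs of a list, stopping at the first mismatch
def runPairs : List Int → Int
  | a :: b :: t => if a = b then runPairs (b :: t) + 1 else 0
  | _ => 0

def fobj_sim_alt (max_F : List Int) (itrConstF : Int) : Bool :=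
  decide (runPairs max_F.reverse = itrConstF - 1)

-- ===== PRECONDITION & SPEC =====
def Spec_fobj_sim (max_F : List Int) (itrConstF : Int) (out : Bool) : Prop := out = fobj_sim_alt max_F itrConstF
instance (max_F : List Int) (itrConstF : Int) (out : Bool) : Decidable (Spec_fobj_sim max_F itrConstF out) := by unfold Spec_fobj_sim; infer_instance

-- ===== CLAIM (what is proved, stated in full; the proofs are below) =====
def Claim_equal_fobj_sim : Prop := ∀ (max_F : List Int) (itrConstF : Int), Dom_fobj_sim max_F itrConstF → Spec_fobj_sim max_F itrConstF (fobj_sim max_F itrConstF)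

-- ===== LEMMAS AND PROOFS =====
lemma runPairs_cons_cons (a b : Int) (t : List Int) :
    runPairs (a :: b :: t) = if a = b then runPairs (b :: t) + 1 else 0 := by
  simp [runPairs]

lemma fold_eq_runPairs (l : List Int) :
    (List.range (l.length - 1)).foldl
      (fun br i => if l.getD i 0 = l.getD (i + 1) 0 then br + 1 else (0 : Int)) 0
    = runPairs l.reverse := by
  induction l using List.reverseRecOn with
  | nil => simp [runPairs]
  | append_singleton l x ih =>
    rcases eq_or_ne l [] with rfl | hne
    · simp [runPairs]
    · obtain ⟨a, t, hrev⟩ : ∃ a t, l.reverse = a :: t := by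
        rcases h : l.reverse with _ | ⟨a, t⟩
        · exact absurd (by simpa using congrArg List.reverse h) hne
        · exact ⟨a, t, rfl⟩
      have hl : l = t.reverse ++ [a] := by
        have := congrArg List.reverse hrev
        simpa using this
      have hn : (l ++ [x]).length - 1 = t.reverse.length + 1 := by
        simp [hl]
      have hrange : List.range ((l ++ [x]).length - 1)
          = List.range (t.reverse.length) ++ [t.reverse.length] := by
        rw [hn, List.range_succ]
      have hlen : l.length - 1 = t.reverse.length := by simp [hl]
      have hcongr : (List.range t.reverse.length).foldl
          (fun br i => if (l ++ [x]).getD i 0 = (l ++ [x]).getD (i + 1) 0 then br + 1 else (0 : Int)) 0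
          = (List.range t.reverse.length).foldl
          (fun br i => if l.getD i 0 = l.getD (i + 1) 0 then br + 1 else (0 : Int)) 0 := by
        apply PySem.List.foldl_congr_mem
        intro br i hi
        have hi' : i < t.length := by simpa using List.mem_range.mp hi
        have h1 : i < l.length := by simp [hl]; omega
        have h2 : i + 1 < l.length := by simp [hl]; omega
        rw [List.getD_append _ _ _ _ h1, List.getD_append _ _ _ _ h2]
      have hget1 : (l ++ [x]).getD t.reverse.length 0 = a := by
        rw [hl, List.append_assoc]
        rw [List.getD_append_right _ _ _ _ (Nat.le_refl _)]
        simp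
      have hget2 : (l ++ [x]).getD (t.reverse.length + 1) 0 = x := by
        have : t.reverse.length + 1 = l.length := by simp [hl]
        rw [this, List.getD_append_right _ _ _ _ (Nat.le_refl _)]
        simp
      rw [hrange, List.foldl_append, hcongr, ← hlen] at *
      simp only [List.foldl_cons, List.foldl_nil]
      rw [hlen, hget1, hget2]
      have hrev' : (l ++ [x]).reverse = x :: a :: t := by simp [hrev]
      rw [hrev', runPairs_cons_cons, ih, hrev]
      by_cases h : a = x
      · simp [h]
      · simp [h, Ne.symm h]

-- ===== VERDICT (by name: the statement is the Claim_ definition above) =====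
theorem fobj_sim_spec : Claim_equal_fobj_sim := by
  intro max_F itrConstF _
  unfold Spec_fobj_sim fobj_sim fobj_sim_alt
  rw [fold_eq_runPairs]
  by_cases h : runPairs max_F.reverse = itrConstF - 1 <;> simp [h]
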